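-- pv_equiv track=rewrite | github.com/Fezk3/LeetCodeProblems | amazon/2.py | min_wildcards_for_intersecting_patterns
-- ===== SOURCE A (Python) =====
-- def find_common_prefix(pattern1, pattern2):
--     i = 0
--     while i < min(len(pattern1), len(pattern2)) and pattern1[i] == pattern2[i]:
--         i += 1
--     return pattern1[:i]
--
-- def min_wildcards_for_intersecting_patterns(regex_patterns):
--     n = len(regex_patterns)
--     unique_chars = set()
--
--     for i in range(n):
--         for j in range(i + 1, n):
--             common_prefix = find_common_prefix(regex_patterns[i], regex_patterns[j])
--             for char in regex_patterns[i][len(common_prefix):]: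
--                 unique_chars.add(char)
--             for char in regex_patterns[j][len(common_prefix):]:
--                 unique_chars.add(char)
--
--     return len(unique_chars)
-- ===== SOURCE B (Python) =====
-- def min_wildcards_for_intersecting_patterns(regex_patterns):
--     if len(regex_patterns) < 2:
--         return 0
--     lo = min(regex_patterns)
--     hi = max(regex_patterns)
--     k = 0
--     while k < len(lo) and k < len(hi) and lo[k] == hi[k]:
--         k += 1
--     chars = set()
--     for p in regex_patterns:
--         chars.update(p[k:])
--     return len(chars)
-- ===== Notes on version B (the rewrite author's own statement) =====
-- stated objective: faster
-- what changed: A scans all O(n^2) pairs, adding each pattern's suffix beyond every pairwise common prefix; B computes the lexicographic min and max pattern and their common-prefix length k once (every pattern's shortest pairwise common prefix equals that of the two extremes), then adds each pattern's suffix from k in a single pass.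
import Mathlib
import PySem

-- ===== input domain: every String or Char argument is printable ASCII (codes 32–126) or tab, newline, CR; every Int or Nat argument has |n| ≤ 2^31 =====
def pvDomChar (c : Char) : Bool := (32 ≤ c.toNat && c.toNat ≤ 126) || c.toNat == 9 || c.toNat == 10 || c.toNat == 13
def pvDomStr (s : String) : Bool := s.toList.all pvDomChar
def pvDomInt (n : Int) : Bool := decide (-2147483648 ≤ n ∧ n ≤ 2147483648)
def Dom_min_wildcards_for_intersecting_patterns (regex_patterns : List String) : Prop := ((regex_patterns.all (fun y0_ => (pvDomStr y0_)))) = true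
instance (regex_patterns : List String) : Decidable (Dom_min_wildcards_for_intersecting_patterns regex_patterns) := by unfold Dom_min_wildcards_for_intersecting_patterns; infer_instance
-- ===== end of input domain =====

-- B replaces A's quadratic all-pairs scan by one pass: it cuts every pattern at the common-prefix
-- length of the lexicographic min and max pattern (each pattern's shortest pairwise common prefix
-- is exactly that of the two extremes); measured faster in a timing run.

-- ===== PORT A =====
-- the while loop of find_common_prefix: index i advances while both chars exist and agree
def pvFcpLen : List Char → List Char → Nat
  | x :: a, y :: b => if x = y then pvFcpLen a b + 1 else 0
  | _, _ => 0

def find_common_prefix (pattern1 pattern2 : String) : String :=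
  -- return pattern1[:i]
  String.ofList (PySem.List.slice pattern1.toList none (some ((pvFcpLen pattern1.toList pattern2.toList : Nat) : Int)))

def min_wildcards_for_intersecting_patterns (regex_patterns : List String) : Int :=
  let n : Int := regex_patterns.length
  let s : PySem.Set Char :=
    (PySem.List.pyRange 0 n 1).foldl (fun s i =>
      (PySem.List.pyRange (i + 1) n 1).foldl (fun s j =>
        let pi := PySem.List.pyGetD regex_patterns i ""
        let pj := PySem.List.pyGetD regex_patterns j ""
        let cp := find_common_prefix pi pj
        let s := (PySem.List.slice pi.toList (some (PySem.Str.len cp)) none).foldl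
          (fun s c => PySem.Set.add s c) s
        (PySem.List.slice pj.toList (some (PySem.Str.len cp)) none).foldl
          (fun s c => PySem.Set.add s c) s) s)
      ([] : PySem.Set Char)
  (s.length : Int)

-- ===== PORT B =====
-- the while loop of B: k advances while lo and hi carry the same char at k
def pvLcp2 : List Char → List Char → Nat
  | x :: a, y :: b => if x = y then pvLcp2 a b + 1 else 0
  | _, _ => 0

def min_wildcards_for_intersecting_patterns_alt (regex_patterns : List String) : Int :=
  if regex_patterns.length < 2 then 0
  else
    -- min/max of a nonempty list: the `some` branch of PySem.List.min?/max? (getD default unreachable)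
    let lo := (PySem.List.min? regex_patterns (fun x => x)).getD ""
    let hi := (PySem.List.max? regex_patterns (fun x => x)).getD ""
    let k := pvLcp2 lo.toList hi.toList
    let s : PySem.Set Char :=
      regex_patterns.foldl (fun s p =>
        PySem.Set.update s (PySem.List.slice p.toList (some ((k : Nat) : Int)) none))
        ([] : PySem.Set Char)
    (s.length : Int)

-- ===== PRECONDITION & SPEC =====
def Spec_min_wildcards_for_intersecting_patterns (regex_patterns : List String) (out : Int) : Prop := out = min_wildcards_for_intersecting_patterns_alt regex_patterns
instance (regex_patterns : List String) (out : Int) : Decidable (Spec_min_wildcards_for_intersecting_patterns regex_patterns out) := by unfold Spec_min_wildcards_for_intersecting_patterns; infer_instance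

-- ===== CLAIM (what is proved, stated in full; the proofs are below) =====
def Claim_equal_min_wildcards_for_intersecting_patterns : Prop := ∀ (regex_patterns : List String), Dom_min_wildcards_for_intersecting_patterns regex_patterns → Spec_min_wildcards_for_intersecting_patterns regex_patterns (min_wildcards_for_intersecting_patterns regex_patterns)

-- ===== LEMMAS AND PROOFS =====

-- basic facts about the common-prefix length
theorem pvFcpLen_self (a : List Char) : pvFcpLen a a = a.length := by
  induction a with
  | nil => rfl
  | cons x a ih => simp [pvFcpLen, ih]

theorem pvFcpLen_comm (a b : List Char) : pvFcpLen a b = pvFcpLen b a := by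
  induction a generalizing b with
  | nil => cases b <;> rfl
  | cons x a ih =>
    cases b with
    | nil => rfl
    | cons y b =>
      simp only [pvFcpLen]
      by_cases h : x = y
      · subst h; simp [ih]
      · rw [if_neg h, if_neg (fun h' => h h'.symm)]

theorem pvFcpLen_le_left (a b : List Char) : pvFcpLen a b ≤ a.length := by
  induction a generalizing b with
  | nil => simp [pvFcpLen]
  | cons x a ih =>
    cases b with
    | nil => simp [pvFcpLen]
    | cons y b =>
      simp only [pvFcpLen, List.length_cons]
      split_ifs
      · exact Nat.succ_le_succ (ih b)
      · omega

theorem pvLcp2_eq_fcp (a b : List Char) : pvLcp2 a b = pvFcpLen a b := by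
  induction a generalizing b with
  | nil => cases b <;> rfl
  | cons x a ih =>
    cases b with
    | nil => rfl
    | cons y b => simp only [pvLcp2, pvFcpLen, ih]

-- destructing ≤ on cons lists (the linear (lexicographic) order on List Char)
theorem le_cons_destruct {x y : Char} {a b : List Char} (h : x :: a ≤ y :: b) :
    x < y ∨ (x = y ∧ a ≤ b) := by
  rcases lt_or_eq_of_le h with h' | h'
  · have hx : List.Lex (· < ·) (x :: a) (y :: b) := h'
    cases hx with
    | cons htail => exact Or.inr ⟨rfl, le_of_lt (show a < b from htail)⟩
    | rel hr => exact Or.inl hr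
  · injection h' with h1 h2
    exact Or.inr ⟨h1, le_of_eq h2⟩

theorem not_cons_le_nil {x : Char} {a : List Char} (h : x :: a ≤ ([] : List Char)) : False := by
  rcases lt_or_eq_of_le h with h' | h'
  · cases (show List.Lex (· < ·) (x :: a) [] from h')
  · simp at h'

theorem pvFcpLen_mono_left {a b c : List Char} (hab : a ≤ b) (hbc : b ≤ c) :
    pvFcpLen a c ≤ pvFcpLen b c := by
  induction c generalizing a b with
  | nil => cases a <;> simp [pvFcpLen]
  | cons z c ih =>
    cases a with
    | nil => simp [pvFcpLen]
    | cons x a =>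
      cases b with
      | nil => exact absurd hab (fun h => not_cons_le_nil h)
      | cons y b =>
        simp only [pvFcpLen]
        by_cases hxz : x = z
        · subst hxz
          rcases le_cons_destruct hab with hlt | ⟨hxy, hab'⟩
          · rcases le_cons_destruct hbc with hlt2 | ⟨hyz, hbc'⟩
            · exact absurd (lt_trans hlt hlt2) (lt_irrefl _)
            · subst hyz; exact absurd hlt (lt_irrefl _)
          · subst hxy
            rcases le_cons_destruct hbc with hlt2 | ⟨hyz, hbc'⟩
            · exact absurd hlt2 (lt_irrefl _)
            · rw [if_pos rfl, if_pos hyz]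
              exact Nat.succ_le_succ (ih hab' hbc')
        · rw [if_neg hxz]
          exact Nat.zero_le _

theorem pvFcpLen_mono_right {a b c : List Char} (hab : a ≤ b) (hbc : b ≤ c) :
    pvFcpLen a c ≤ pvFcpLen a b := by
  induction a generalizing b c with
  | nil => simp [pvFcpLen]
  | cons x a ih =>
    cases c with
    | nil => cases b <;> simp [pvFcpLen]
    | cons z c =>
      cases b with
      | nil => exact absurd hab (fun h => not_cons_le_nil h)
      | cons y b =>
        simp only [pvFcpLen]
        by_cases hxz : x = z
        · subst hxz
          rcases le_cons_destruct hab with hlt | ⟨hxy, hab'⟩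
          · rcases le_cons_destruct hbc with hlt2 | ⟨hyz, hbc'⟩
            · exact absurd (lt_trans hlt hlt2) (lt_irrefl _)
            · subst hyz; exact absurd hlt (lt_irrefl _)
          · rcases le_cons_destruct hbc with hlt2 | ⟨hyz, hbc'⟩
            · subst hxy; exact absurd hlt2 (lt_irrefl _)
            · rw [if_pos rfl, if_pos hxy]
              exact Nat.succ_le_succ (ih hab' hbc')
        · rw [if_neg hxz]
          exact Nat.zero_le _

-- generic membership / nodup lemmas for set-building folds
theorem mem_foldl_gen {β : Type} (l : List β) (F : PySem.Set Char → β → PySem.Set Char)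
    (P : β → Char → Prop) (h : ∀ s b c, c ∈ F s b ↔ c ∈ s ∨ P b c)
    (s : PySem.Set Char) (c : Char) :
    c ∈ l.foldl F s ↔ c ∈ s ∨ ∃ b ∈ l, P b c := by
  induction l generalizing s with
  | nil => simp
  | cons b l ih =>
    simp only [List.foldl_cons, ih, h, List.mem_cons]
    constructor
    · rintro (( hs | hp) | ⟨b', hb', hp⟩)
      · exact Or.inl hs
      · exact Or.inr ⟨b, Or.inl rfl, hp⟩
      · exact Or.inr ⟨b', Or.inr hb', hp⟩
    · rintro (hs | ⟨b', (rfl | hb'), hp⟩)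
      · exact Or.inl (Or.inl hs)
      · exact Or.inl (Or.inr hp)
      · exact Or.inr ⟨b', hb', hp⟩

theorem mem_foldl_add_id (l : List Char) (s : PySem.Set Char) (c : Char) :
    c ∈ l.foldl (fun s c => PySem.Set.add s c) s ↔ c ∈ s ∨ c ∈ l := by
  rw [PySem.Set.mem_foldl_add (f := fun c => c)]
  simp

theorem nodup_foldl_gen {β : Type} (l : List β) (F : PySem.Set Char → β → PySem.Set Char)
    (h : ∀ s b, s.Nodup → (F s b).Nodup) (s : PySem.Set Char) (hs : s.Nodup) :
    (l.foldl F s).Nodup := by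
  induction l generalizing s with
  | nil => exact hs
  | cons b l ih => exact ih _ (h s b hs)

theorem nodup_foldl_add_id (l : List Char) (s : PySem.Set Char) (hs : s.Nodup) :
    (l.foldl (fun s c => PySem.Set.add s c) s).Nodup :=
  nodup_foldl_gen l _ (fun s b h => PySem.Set.nodup_add s b h) s hs


-- proof-side names for the two set-building folds and their membership predicates
def pvSA (l : List String) : PySem.Set Char :=
  (PySem.List.pyRange 0 (l.length : Int) 1).foldl (fun s i =>
    (PySem.List.pyRange (i + 1) (l.length : Int) 1).foldl (fun s j =>
      let pi := PySem.List.pyGetD l i ""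
      let pj := PySem.List.pyGetD l j ""
      let cp := find_common_prefix pi pj
      let s := (PySem.List.slice pi.toList (some (PySem.Str.len cp)) none).foldl
        (fun s c => PySem.Set.add s c) s
      (PySem.List.slice pj.toList (some (PySem.Str.len cp)) none).foldl
        (fun s c => PySem.Set.add s c) s) s)
    ([] : PySem.Set Char)

def pvSB (l : List String) (lo hi : String) : PySem.Set Char :=
  l.foldl (fun s p =>
    PySem.Set.update s
      (PySem.List.slice p.toList (some ((pvLcp2 lo.toList hi.toList : Nat) : Int)) none))
    ([] : PySem.Set Char)

def pvQ (l : List String) (i j : Int) (c : Char) : Prop :=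
  c ∈ (PySem.List.pyGetD l i "").toList.drop
        (pvFcpLen (PySem.List.pyGetD l i "").toList (PySem.List.pyGetD l j "").toList) ∨
  c ∈ (PySem.List.pyGetD l j "").toList.drop
        (pvFcpLen (PySem.List.pyGetD l i "").toList (PySem.List.pyGetD l j "").toList)

def pvPA (l : List String) (c : Char) : Prop :=
  ∃ i j : Nat, i < j ∧ j < l.length ∧
    (c ∈ (l.getD i "").toList.drop (pvFcpLen (l.getD i "").toList (l.getD j "").toList) ∨
     c ∈ (l.getD j "").toList.drop (pvFcpLen (l.getD i "").toList (l.getD j "").toList))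

def pvPB (l : List String) (lo hi : String) (c : Char) : Prop :=
  ∃ p ∈ l, c ∈ p.toList.drop (pvLcp2 lo.toList hi.toList)

theorem A_eq_SA (l : List String) :
    min_wildcards_for_intersecting_patterns l = ((pvSA l).length : Int) := rfl

theorem alt_eq_SB (l : List String) (h2 : ¬ l.length < 2) :
    min_wildcards_for_intersecting_patterns_alt l =
      ((pvSB l ((PySem.List.min? l (fun x => x)).getD "")
               ((PySem.List.max? l (fun x => x)).getD "")).length : Int) := by
  unfold min_wildcards_for_intersecting_patterns_alt pvSB
  rw [if_neg h2]

theorem len_fcp (p q : String) :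
    PySem.Str.len (find_common_prefix p q) = ((pvFcpLen p.toList q.toList : Nat) : Int) := by
  unfold find_common_prefix
  rw [PySem.Str.len_eq, String.toList_ofList, PySem.List.slice_to_natCast]
  congr 1
  rw [List.length_take]
  exact Nat.min_eq_left (pvFcpLen_le_left _ _)

theorem mem_SA_range (l : List String) (c : Char) :
    c ∈ pvSA l ↔ ∃ i ∈ PySem.List.pyRange 0 (l.length : Int) 1,
      ∃ j ∈ PySem.List.pyRange (i + 1) (l.length : Int) 1, pvQ l i j c := by
  unfold pvSA
  refine (mem_foldl_gen _ _
      (fun i c => ∃ j ∈ PySem.List.pyRange (i + 1) (l.length : Int) 1, pvQ l i j c)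
      ?_ _ c).trans (by simp)
  intro s i c
  refine mem_foldl_gen _ _ (fun j c => pvQ l i j c) ?_ s c
  intro s j c
  simp only [len_fcp, PySem.List.slice_from_natCast, mem_foldl_add_id, pvQ]
  tauto

theorem mem_SA (l : List String) (c : Char) : c ∈ pvSA l ↔ pvPA l c := by
  rw [mem_SA_range]
  simp only [PySem.List.mem_pyRange_one]
  constructor
  · rintro ⟨i, ⟨hi0, hin⟩, j, ⟨hji, hjn⟩, hq⟩
    have hi' : i.toNat < l.length := by omega
    have hj' : j.toNat < l.length := by omega
    have e1 : PySem.List.pyGetD l i "" = l.getD i.toNat "" := by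
      rw [show i = ((i.toNat : Nat) : Int) by omega, PySem.List.pyGetD_natCast, Int.toNat_natCast]
    have e2 : PySem.List.pyGetD l j "" = l.getD j.toNat "" := by
      rw [show j = ((j.toNat : Nat) : Int) by omega, PySem.List.pyGetD_natCast, Int.toNat_natCast]
    refine ⟨i.toNat, j.toNat, by omega, hj', ?_⟩
    simpa only [pvQ, e1, e2] using hq
  · rintro ⟨i, j, hij, hj, hd⟩
    refine ⟨(i : Int), ⟨by positivity, by exact_mod_cast lt_trans hij hj⟩,
      (j : Int), ⟨by omega, by exact_mod_cast hj⟩, ?_⟩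
    simpa only [pvQ, PySem.List.pyGetD_natCast] using hd

theorem mem_SB (l : List String) (lo hi : String) (c : Char) :
    c ∈ pvSB l lo hi ↔ pvPB l lo hi c := by
  unfold pvSB
  refine (mem_foldl_gen _ _
      (fun p c => c ∈ p.toList.drop (pvLcp2 lo.toList hi.toList)) ?_ _ c).trans
    (by simp [pvPB])
  intro s p c
  rw [PySem.List.slice_from_natCast]
  simp [PySem.Set.mem_update]

theorem nodup_SA (l : List String) : (pvSA l).Nodup := by
  unfold pvSA
  apply nodup_foldl_gen
  · intro s i hs
    apply nodup_foldl_gen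
    · intro s' j hs'
      exact nodup_foldl_add_id _ _ (nodup_foldl_add_id _ _ hs')
    · exact hs
  · exact List.nodup_nil

theorem nodup_SB (l : List String) (lo hi : String) : (pvSB l lo hi).Nodup := by
  unfold pvSB
  apply nodup_foldl_gen
  · intro s p hs
    exact PySem.Set.nodup_update _ _ hs
  · exact List.nodup_nil

theorem mem_drop_of_le {k m : Nat} {xs : List Char} {c : Char} (h : k ≤ m)
    (hc : c ∈ xs.drop m) : c ∈ xs.drop k := by
  have he : xs.drop m = (xs.drop k).drop (m - k) := by
    rw [List.drop_drop]; congr 1; omega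
  rw [he] at hc
  exact List.drop_subset _ _ hc

theorem fcp_min_ge {a b c : List Char} (hab : a ≤ b) (hbc : b ≤ c) :
    min (pvFcpLen a b) (pvFcpLen b c) ≤ pvFcpLen a c := by
  induction a generalizing b c with
  | nil => simp [pvFcpLen]
  | cons x a ih =>
    cases b with
    | nil => exact absurd hab (fun h => not_cons_le_nil h)
    | cons y b =>
      cases c with
      | nil => exact absurd hbc (fun h => not_cons_le_nil h)
      | cons z c =>
        simp only [pvFcpLen]
        by_cases hxy : x = y
        · rcases le_cons_destruct hab with hlt | ⟨_, hab'⟩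
          · exact absurd hlt (by simp [hxy])
          · by_cases hyz : y = z
            · rcases le_cons_destruct hbc with hlt2 | ⟨_, hbc'⟩
              · exact absurd hlt2 (by simp [hyz])
              · rw [if_pos hxy, if_pos hyz, if_pos (hxy.trans hyz)]
                have := ih hab' hbc'
                omega
            · rw [if_neg hyz]
              omega
        · rw [if_neg hxy]
          omega

theorem fcp_extremes {lo p hi : String} (hlop : lo ≤ p) (hphi : p ≤ hi) :
    pvFcpLen lo.toList hi.toList =
      min (pvFcpLen p.toList lo.toList) (pvFcpLen p.toList hi.toList) := by
  have h1 : lo.toList ≤ p.toList := String.le_iff_toList_le.mp hlop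
  have h2 : p.toList ≤ hi.toList := String.le_iff_toList_le.mp hphi
  apply Nat.le_antisymm
  · apply le_min
    · calc pvFcpLen lo.toList hi.toList
          ≤ pvFcpLen lo.toList p.toList := pvFcpLen_mono_right h1 h2
        _ = pvFcpLen p.toList lo.toList := pvFcpLen_comm _ _
    · exact pvFcpLen_mono_left h1 h2
  · have h := fcp_min_ge h1 h2
    rwa [pvFcpLen_comm lo.toList p.toList] at h

theorem k_le_fcp {lo hi p q : String} (hlop : lo ≤ p) (hphi : p ≤ hi)
    (hloq : lo ≤ q) (hqhi : q ≤ hi) :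
    pvFcpLen lo.toList hi.toList ≤ pvFcpLen p.toList q.toList := by
  rw [fcp_extremes hlop hphi]
  rcases le_total p q with hpq | hqp
  · exact le_trans (min_le_right _ _)
      (pvFcpLen_mono_right (String.le_iff_toList_le.mp hpq) (String.le_iff_toList_le.mp hqhi))
  · refine le_trans (min_le_left _ _) ?_
    calc pvFcpLen p.toList lo.toList = pvFcpLen lo.toList p.toList := pvFcpLen_comm _ _
      _ ≤ pvFcpLen q.toList p.toList :=
        pvFcpLen_mono_left (String.le_iff_toList_le.mp hloq) (String.le_iff_toList_le.mp hqp)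
      _ = pvFcpLen p.toList q.toList := pvFcpLen_comm _ _

theorem PA_iff_PB (l : List String) (lo hi : String)
    (hlo : lo ∈ l) (hlomin : ∀ q ∈ l, lo ≤ q)
    (hhi : hi ∈ l) (hhimax : ∀ q ∈ l, q ≤ hi) (c : Char) :
    pvPA l c ↔ pvPB l lo hi c := by
  constructor
  · rintro ⟨i, j, hij, hj, hc⟩
    have hi' : i < l.length := lt_trans hij hj
    have hpi : l.getD i "" ∈ l := by
      rw [List.getD_eq_getElem _ _ hi']; exact List.getElem_mem _
    have hpj : l.getD j "" ∈ l := by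
      rw [List.getD_eq_getElem _ _ hj]; exact List.getElem_mem _
    rcases hc with hc | hc
    · refine ⟨l.getD i "", hpi, mem_drop_of_le ?_ hc⟩
      rw [pvLcp2_eq_fcp]
      exact k_le_fcp (hlomin _ hpi) (hhimax _ hpi) (hlomin _ hpj) (hhimax _ hpj)
    · refine ⟨l.getD j "", hpj, mem_drop_of_le ?_ hc⟩
      rw [pvLcp2_eq_fcp]
      have h := k_le_fcp (hlomin _ hpj) (hhimax _ hpj) (hlomin _ hpi) (hhimax _ hpi)
      rwa [pvFcpLen_comm (l.getD j "").toList] at h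
  · rintro ⟨p, hp, hc⟩
    obtain ⟨i, hilen, hpi⟩ := List.mem_iff_getElem.mp hp
    have hkm : pvLcp2 lo.toList hi.toList
        = min (pvFcpLen p.toList lo.toList) (pvFcpLen p.toList hi.toList) := by
      rw [pvLcp2_eq_fcp]; exact fcp_extremes (hlomin _ hp) (hhimax _ hp)
    by_cases hle : pvFcpLen p.toList lo.toList ≤ pvFcpLen p.toList hi.toList
    · have hk : pvLcp2 lo.toList hi.toList = pvFcpLen p.toList lo.toList :=
        hkm.trans (Nat.min_eq_left hle)
      obtain ⟨a, halen, hla⟩ := List.mem_iff_getElem.mp hlo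
      by_cases hai : a = i
      · exfalso
        subst hai
        have hplo : p = lo := by rw [← hpi, ← hla]
        rw [hk, hplo, pvFcpLen_self, List.drop_length] at hc
        cases hc
      · rcases Nat.lt_or_ge i a with hia | hge
        · refine ⟨i, a, hia, halen, Or.inl ?_⟩
          rw [List.getD_eq_getElem _ _ hilen, List.getD_eq_getElem _ _ halen, hpi, hla, ← hk]
          exact hc
        · have hai' : a < i := by omega
          refine ⟨a, i, hai', hilen, Or.inr ?_⟩
          rw [List.getD_eq_getElem _ _ hilen, List.getD_eq_getElem _ _ halen, hpi, hla,
            pvFcpLen_comm lo.toList, ← hk]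
          exact hc
    · rw [not_le] at hle
      have hk : pvLcp2 lo.toList hi.toList = pvFcpLen p.toList hi.toList :=
        hkm.trans (Nat.min_eq_right (le_of_lt hle))
      obtain ⟨b, hblen, hlb⟩ := List.mem_iff_getElem.mp hhi
      by_cases hbi : b = i
      · exfalso
        subst hbi
        have hphi : p = hi := by rw [← hpi, ← hlb]
        have h1 : pvFcpLen p.toList hi.toList = p.toList.length := by
          rw [hphi, pvFcpLen_self]
        have h2 := pvFcpLen_le_left p.toList lo.toList
        omega
      · rcases Nat.lt_or_ge i b with hib | hge
        · refine ⟨i, b, hib, hblen, Or.inl ?_⟩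
          rw [List.getD_eq_getElem _ _ hilen, List.getD_eq_getElem _ _ hblen, hpi, hlb, ← hk]
          exact hc
        · have hbi' : b < i := by omega
          refine ⟨b, i, hbi', hilen, Or.inr ?_⟩
          rw [List.getD_eq_getElem _ _ hilen, List.getD_eq_getElem _ _ hblen, hpi, hlb,
            pvFcpLen_comm hi.toList, ← hk]
          exact hc

theorem SA_small (l : List String) (h2 : l.length < 2) : pvSA l = [] := by
  apply List.eq_nil_iff_forall_not_mem.mpr
  intro c hc
  obtain ⟨i, j, hij, hj, _⟩ := (mem_SA l c).mp hc
  omega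

theorem ports_eq (l : List String) :
    min_wildcards_for_intersecting_patterns l = min_wildcards_for_intersecting_patterns_alt l := by
  by_cases h2 : l.length < 2
  · rw [A_eq_SA, SA_small l h2]
    unfold min_wildcards_for_intersecting_patterns_alt
    rw [if_pos h2]
    rfl
  · have hne : l ≠ [] := by
      intro h; subst h; simp at h2
    obtain ⟨lo, hloeq⟩ : ∃ lo, PySem.List.min? l (fun x => x) = some lo := by
      cases h : PySem.List.min? l (fun x => x) with
      | none => exact absurd ((PySem.List.min?_eq_none_iff l (fun x => x)).mp h) hne
      | some lo => exact ⟨lo, rfl⟩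
    obtain ⟨hi, hhieq⟩ : ∃ hi, PySem.List.max? l (fun x => x) = some hi := by
      cases h : PySem.List.max? l (fun x => x) with
      | none => exact absurd ((PySem.List.max?_eq_none_iff l (fun x => x)).mp h) hne
      | some hi => exact ⟨hi, rfl⟩
    have hlo := PySem.List.min?_mem hloeq
    have hhi := PySem.List.max?_mem hhieq
    have hlomin : ∀ q ∈ l, lo ≤ q := PySem.List.min?_isMin hloeq
    have hhimax : ∀ q ∈ l, q ≤ hi := PySem.List.max?_isMax hhieq
    rw [A_eq_SA, alt_eq_SB l h2, hloeq, hhieq]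
    simp only [Option.getD_some]
    congr 1
    exact List.Perm.length_eq ((List.perm_ext_iff_of_nodup (nodup_SA l) (nodup_SB l lo hi)).mpr
      (fun c => (mem_SA l c).trans
        ((PA_iff_PB l lo hi hlo hlomin hhi hhimax c).trans (mem_SB l lo hi c).symm)))

-- ===== VERDICT (by name: the statement is the Claim_ definition above) =====
theorem min_wildcards_for_intersecting_patterns_spec : Claim_equal_min_wildcards_for_intersecting_patterns := by
  intro l _
  unfold Spec_min_wildcards_for_intersecting_patterns
  exact ports_eq l
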